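-- pv_equiv track=rewrite | github.com/mbryla/training-python | training/files/files.py | add_count_words
-- ===== SOURCE A (Python) =====
-- def add_count_words(words_count, line, case_sensitive=True):
--     for word in line.replace('.', '').replace(',', '').split(' '):
--         if case_sensitive:
--             if word in words_count.keys():
--                 words_count[word] += 1
--         else:
--             for key in words_count.keys():
--                 if word.upper() == key.upper():
--                     words_count[key] += 1
--
--     return words_count
-- ===== SOURCE B (Python) =====
-- def add_count_words(words_count, line, case_sensitive=True):
--     words = line.replace('.', '').replace(',', '').split(' ')
--     for key in list(words_count.keys()):
--         if case_sensitive: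
--             words_count[key] += words.count(key)
--         else:
--             u = key.upper()
--             words_count[key] += sum(1 for w in words if w.upper() == u)
--     return words_count
-- ===== Notes on version B (the rewrite author's own statement) =====
-- stated objective: alternative
-- what changed: Inverted the loop nesting: B splits the line once and iterates over the dict keys, adding to each key the number of matching words in one shot (words.count / a case-folded sum), instead of A's word-outer scan that increments per word.
import Mathlib
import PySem

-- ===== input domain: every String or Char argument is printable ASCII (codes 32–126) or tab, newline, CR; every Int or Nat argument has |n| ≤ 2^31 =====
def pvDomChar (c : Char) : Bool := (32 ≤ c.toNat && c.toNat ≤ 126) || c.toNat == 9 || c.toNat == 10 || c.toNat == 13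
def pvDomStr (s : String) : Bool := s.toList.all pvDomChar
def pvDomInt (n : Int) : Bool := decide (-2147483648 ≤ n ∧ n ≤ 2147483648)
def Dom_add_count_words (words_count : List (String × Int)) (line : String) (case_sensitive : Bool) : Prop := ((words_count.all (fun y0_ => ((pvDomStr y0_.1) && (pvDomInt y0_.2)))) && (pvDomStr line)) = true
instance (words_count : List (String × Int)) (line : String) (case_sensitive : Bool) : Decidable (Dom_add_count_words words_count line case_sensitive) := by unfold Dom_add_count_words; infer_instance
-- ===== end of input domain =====

-- B inverts the loop nesting of A (key-outer with a per-key word count, instead of A's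
-- word-outer per-word increments); equivalence of the RETURN value is what is proved
-- (in Python both mutate the dict in place identically).

-- the word list both Pythons compute: line.replace('.', '').replace(',', '').split(' ')
def pvWords (line : String) : List String :=
  (PySem.Str.split? (PySem.Str.replace (PySem.Str.replace line "." "") "," "") " ").getD []

-- ===== PORT A =====
def add_count_words (words_count : List (String × Int)) (line : String) (case_sensitive : Bool) : List (String × Int) :=
  ((pvWords line).foldl
    (fun d w =>
      if case_sensitive then
        (if d.contains w then d.modify w 0 (· + 1) else d)
      else
        d.keys.foldl
          (fun d' key => if PySem.Str.upper w = PySem.Str.upper key then d'.modify key 0 (· + 1) else d')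
          d)
    (PySem.Dict.mk words_count)).items

-- ===== PORT B =====
def add_count_words_alt (words_count : List (String × Int)) (line : String) (case_sensitive : Bool) : List (String × Int) :=
  let words := pvWords line
  let d0 : PySem.Dict String Int := PySem.Dict.mk words_count
  (d0.keys.foldl
    (fun d key =>
      if case_sensitive then
        d.modify key 0 (· + (words.count key : Int))
      else
        d.modify key 0 (· + ((words.countP (fun w => PySem.Str.upper w = PySem.Str.upper key)) : Int)))
    d0).items

-- ===== PRECONDITION & SPEC =====
-- words_count is a Python dict, so its association-list encoding always has pairwise
-- distinct keys; Pre_ states exactly that (no real Python input is excluded).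
def Pre_add_count_words (words_count : List (String × Int)) (line : String) (case_sensitive : Bool) : Prop :=
  (words_count.map Prod.fst).Nodup
instance (words_count : List (String × Int)) (line : String) (case_sensitive : Bool) : Decidable (Pre_add_count_words words_count line case_sensitive) := by unfold Pre_add_count_words; infer_instance

def pvWitness_add_count_words : (List (String × Int)) × String × Bool := ([("a", 2), ("Bc", 0)], "a bc, a.", true)

def Spec_add_count_words (words_count : List (String × Int)) (line : String) (case_sensitive : Bool) (out : List (String × Int)) : Prop := out = add_count_words_alt words_count line case_sensitive
instance (words_count : List (String × Int)) (line : String) (case_sensitive : Bool) (out : List (String × Int)) : Decidable (Spec_add_count_words words_count line case_sensitive out) := by unfold Spec_add_count_words; infer_instance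

-- ===== CLAIM (what is proved, stated in full; the proofs are below) =====
def Claim_equal_add_count_words : Prop := ∀ (words_count : List (String × Int)) (line : String) (case_sensitive : Bool), Dom_add_count_words words_count line case_sensitive → Pre_add_count_words words_count line case_sensitive → Spec_add_count_words words_count line case_sensitive (add_count_words words_count line case_sensitive)

-- ===== LEMMAS AND PROOFS =====

-- A fold of guarded increments over a list of keys already present keeps the key list.
theorem pv_fold_keys (P : String → Prop) [DecidablePred P] (c : String → Int) :
    ∀ (ks : List String) (d : PySem.Dict String Int), (∀ k ∈ ks, k ∈ d.keys) →
    (ks.foldl (fun d' x => if P x then d'.modify x 0 (· + c x) else d') d).keys = d.keys := by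
  intro ks
  induction ks with
  | nil => intro d _; rfl
  | cons x ks ih =>
    intro d hmem
    have hx : d.contains x = true := (PySem.Dict.contains_iff_mem_keys d x).mpr (hmem x (by simp))
    have hkeys : (if P x then d.modify x 0 (· + c x) else d).keys = d.keys := by
      split_ifs with hP
      · rw [PySem.Dict.keys_modify, PySem.Dict.keys_insert_of_contains _ _ hx]
      · rfl
    simp only [List.foldl_cons]
    rw [ih _ (by intro k hk; rw [hkeys]; exact hmem k (List.mem_cons_of_mem _ hk)), hkeys]

-- The value at any key after such a fold over a duplicate-free key list.
theorem pv_fold_getD (P : String → Prop) [DecidablePred P] (c : String → Int) :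
    ∀ (ks : List String) (d : PySem.Dict String Int) (k : String), ks.Nodup →
    (ks.foldl (fun d' x => if P x then d'.modify x 0 (· + c x) else d') d).getD k 0
      = d.getD k 0 + if k ∈ ks ∧ P k then c k else 0 := by
  intro ks
  induction ks with
  | nil => intro d k _; simp
  | cons x ks ih =>
    intro d k hnd
    have hx : x ∉ ks := (List.nodup_cons.mp hnd).1
    simp only [List.foldl_cons]
    rw [ih _ k (List.nodup_cons.mp hnd).2]
    by_cases hkx : k = x
    · subst hkx
      have hns : k ∉ ks := hx
      split_ifs with hP h1 h2 <;>
        simp_all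
    · have hstep : (if P x then d.modify x 0 (· + c x) else d).getD k 0 = d.getD k 0 := by
        split_ifs with hP
        · rw [PySem.Dict.getD_modify]; simp [hkx]
        · rfl
      rw [hstep]
      by_cases hks : k ∈ ks <;> by_cases hP : P k <;>
        simp [hks, hP, hkx, List.mem_cons]

-- the unguarded form used by port B
theorem pv_foldB_keys (c : String → Int) (ks : List String) (d : PySem.Dict String Int)
    (hmem : ∀ k ∈ ks, k ∈ d.keys) :
    (ks.foldl (fun d' x => d'.modify x 0 (· + c x)) d).keys = d.keys := by
  have hfun : (fun (d' : PySem.Dict String Int) (x : String) => d'.modify x 0 (· + c x))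
      = (fun d' x => if (fun (_ : String) => True) x then d'.modify x 0 (· + c x) else d') := by
    funext d' x; simp
  rw [hfun]
  exact pv_fold_keys (fun _ => True) c ks d hmem

theorem pv_foldB_getD (c : String → Int) (ks : List String) (d : PySem.Dict String Int)
    (k : String) (hnd : ks.Nodup) :
    (ks.foldl (fun d' x => d'.modify x 0 (· + c x)) d).getD k 0
      = d.getD k 0 + if k ∈ ks then c k else 0 := by
  have hfun : (fun (d' : PySem.Dict String Int) (x : String) => d'.modify x 0 (· + c x))
      = (fun d' x => if (fun (_ : String) => True) x then d'.modify x 0 (· + c x) else d') := by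
    funext d' x; simp
  rw [hfun, pv_fold_getD (fun _ => True) c ks d k hnd]
  simp

-- A's case-sensitive outer loop: keys unchanged.
theorem pvA_sens_keys :
    ∀ (ws : List String) (d : PySem.Dict String Int),
    (ws.foldl (fun d w => if d.contains w then d.modify w 0 (· + 1) else d) d).keys = d.keys := by
  intro ws
  induction ws with
  | nil => intro d; rfl
  | cons w ws ih =>
    intro d
    simp only [List.foldl_cons]
    rw [ih]
    by_cases hc : d.contains w = true
    · rw [if_pos hc, PySem.Dict.keys_modify, PySem.Dict.keys_insert_of_contains _ _ hc]
    · rw [if_neg (by simpa using hc)]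

-- A's case-sensitive outer loop: value at a present key grows by the word count.
theorem pvA_sens_getD :
    ∀ (ws : List String) (d : PySem.Dict String Int) (k : String), d.contains k = true →
    (ws.foldl (fun d w => if d.contains w then d.modify w 0 (· + 1) else d) d).getD k 0
      = d.getD k 0 + (ws.count k : Int) := by
  intro ws
  induction ws with
  | nil => intro d k _; simp
  | cons w ws ih =>
    intro d k hk
    simp only [List.foldl_cons]
    by_cases hc : d.contains w = true
    · rw [if_pos hc, ih _ k (by rw [PySem.Dict.contains_modify]; simp [hk]),
        PySem.Dict.getD_modify]
      by_cases hkw : k = w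
      · subst hkw
        rw [if_pos rfl]
        simp only [List.count_cons, beq_self_eq_true, if_pos]
        push_cast
        ring
      · rw [if_neg hkw]
        have : (w == k) = false := by simp [Ne.symm hkw]
        simp [List.count_cons, this]
    · rw [if_neg (by simpa using hc)]
      have hkw : w ≠ k := by
        intro h; subst h; exact hc hk
      rw [ih _ k hk]
      have : (w == k) = false := by simp [hkw]
      simp [List.count_cons, this]

-- A's case-insensitive outer loop: keys unchanged.
theorem pvA_ins_keys :
    ∀ (ws : List String) (d : PySem.Dict String Int),
    (ws.foldl (fun d w => d.keys.foldl
        (fun d' key => if PySem.Str.upper w = PySem.Str.upper key then d'.modify key 0 (· + 1) else d') d) d).keys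
      = d.keys := by
  intro ws
  induction ws with
  | nil => intro d; rfl
  | cons w ws ih =>
    intro d
    simp only [List.foldl_cons]
    rw [ih, pv_fold_keys (fun key => PySem.Str.upper w = PySem.Str.upper key) (fun _ => 1) d.keys d
      (fun k hk => hk)]

-- A's case-insensitive outer loop: value at a present key grows by the case-folded count.
theorem pvA_ins_getD :
    ∀ (ws : List String) (d : PySem.Dict String Int) (k : String), d.keys.Nodup → k ∈ d.keys →
    (ws.foldl (fun d w => d.keys.foldl
        (fun d' key => if PySem.Str.upper w = PySem.Str.upper key then d'.modify key 0 (· + 1) else d') d) d).getD k 0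
      = d.getD k 0 + ((ws.countP (fun w => PySem.Str.upper w = PySem.Str.upper k)) : Int) := by
  intro ws
  induction ws with
  | nil => intro d k _ _; simp
  | cons w ws ih =>
    intro d k hnd hk
    simp only [List.foldl_cons]
    have hkeys := pv_fold_keys (fun key => PySem.Str.upper w = PySem.Str.upper key) (fun _ => 1)
      d.keys d (fun k hk => hk)
    rw [ih _ k (by rw [hkeys]; exact hnd) (by rw [hkeys]; exact hk),
      pv_fold_getD (fun key => PySem.Str.upper w = PySem.Str.upper key) (fun _ => 1) d.keys d k hnd]
    rw [List.countP_cons]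
    by_cases hm : PySem.Str.upper w = PySem.Str.upper k
    · rw [if_pos ⟨hk, hm⟩]
      simp only [hm, decide_true, if_pos]
      push_cast
      ring
    · rw [if_neg (by tauto)]
      simp [hm]

theorem add_count_words_spec_aux (words_count : List (String × Int)) (line : String)
    (case_sensitive : Bool) (hpre : (words_count.map Prod.fst).Nodup) :
    add_count_words words_count line case_sensitive
      = add_count_words_alt words_count line case_sensitive := by
  unfold add_count_words add_count_words_alt
  set ws := pvWords line with hws
  set d0 : PySem.Dict String Int := PySem.Dict.mk words_count with hd0
  have hnd : d0.keys.Nodup := hpre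
  cases case_sensitive
  · -- case insensitive
    simp only [Bool.false_eq_true, if_false]
    have hkA := pvA_ins_keys ws d0
    have hkB := pv_foldB_keys (fun key => ((ws.countP (fun w => PySem.Str.upper w = PySem.Str.upper key)) : Int))
      d0.keys d0 (fun k hk => hk)
    rw [PySem.Dict.items_eq_map_keys _ (by rw [hkA]; exact hnd) 0,
        PySem.Dict.items_eq_map_keys _ (by rw [hkB]; exact hnd) 0, hkA, hkB]
    apply List.map_congr_left
    intro k hk
    rw [pvA_ins_getD ws d0 k hnd hk,
        pv_foldB_getD (fun key => ((ws.countP (fun w => PySem.Str.upper w = PySem.Str.upper key)) : Int))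
          d0.keys d0 k hnd, if_pos hk]
  · -- case sensitive
    simp only [if_true]
    have hkA := pvA_sens_keys ws d0
    have hkB := pv_foldB_keys (fun key => (ws.count key : Int)) d0.keys d0 (fun k hk => hk)
    rw [PySem.Dict.items_eq_map_keys _ (by rw [hkA]; exact hnd) 0,
        PySem.Dict.items_eq_map_keys _ (by rw [hkB]; exact hnd) 0, hkA, hkB]
    apply List.map_congr_left
    intro k hk
    rw [pvA_sens_getD ws d0 k ((PySem.Dict.contains_iff_mem_keys d0 k).mpr hk),
        pv_foldB_getD (fun key => (ws.count key : Int)) d0.keys d0 k hnd, if_pos hk]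

-- ===== VERDICT (by name: the statement is the Claim_ definition above) =====
theorem add_count_words_spec : Claim_equal_add_count_words := by
  intro words_count line case_sensitive _hdom hpre
  unfold Spec_add_count_words
  exact add_count_words_spec_aux words_count line case_sensitive hpre
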